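-- pv_equiv track=rewrite | github.com/tanvirahmedkhan74/ClassFaka | ClassRoom.py | parse_day_time
-- ===== SOURCE A (Python) =====
-- def parse_day_time(day_time):
--     day_on = True
--
--     day = ""
--     time = ""
--
--     for i in day_time:
--         if i == ' ':
--             day_on = False
--             continue
--         if day_on:
--             day += i
--         else:
--             time += i
--     return day, time
-- ===== SOURCE B (Python) =====
-- def parse_day_time(day_time):
--     day, _, rest = day_time.partition(' ')
--     time = ''.join(c for c in rest if c != ' ')
--     return day, time
-- ===== Notes on version B (the rewrite author's own statement) =====
-- stated objective: simpler
-- what changed: Replaced the stateful character-by-character loop with a partition at the first space followed by filtering remaining spaces out of the time part.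
import Mathlib
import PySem

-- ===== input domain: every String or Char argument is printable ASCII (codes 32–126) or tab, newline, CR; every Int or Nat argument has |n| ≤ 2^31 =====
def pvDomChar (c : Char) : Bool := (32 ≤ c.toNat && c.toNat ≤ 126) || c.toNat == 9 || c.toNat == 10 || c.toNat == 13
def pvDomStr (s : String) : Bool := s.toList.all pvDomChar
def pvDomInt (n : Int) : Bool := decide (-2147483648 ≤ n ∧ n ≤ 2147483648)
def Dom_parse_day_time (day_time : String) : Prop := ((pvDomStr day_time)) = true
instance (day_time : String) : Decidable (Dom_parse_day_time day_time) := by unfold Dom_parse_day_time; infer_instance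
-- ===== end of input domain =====

-- B replaces A's stateful character loop by partition-at-first-space + filtering spaces from the rest (simpler decomposition).
-- ===== PORT A =====
-- the for-loop of A, step for step: state (day_on, day, time)
def pvLoopA : List Char → Bool → List Char → List Char → (List Char × List Char)
  | [], _, d, t => (d, t)
  | c :: cs, day_on, d, t =>
    if c = ' ' then pvLoopA cs false d t
    else if day_on then pvLoopA cs day_on (d ++ [c]) t
    else pvLoopA cs day_on d (t ++ [c])

def parse_day_time (day_time : String) : String × String :=
  let r := pvLoopA day_time.toList true [] []
  (String.mk r.1, String.mk r.2)

-- ===== PORT B =====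
def parse_day_time_alt (day_time : String) : String × String :=
  let cs := day_time.toList
  -- day, _, rest = day_time.partition(' ')
  let day := cs.takeWhile (· ≠ ' ')
  let rest := (cs.dropWhile (· ≠ ' ')).drop 1
  -- time = ''.join(c for c in rest if c != ' ')
  let time := rest.filter (· ≠ ' ')
  (String.mk day, String.mk time)

-- ===== PRECONDITION & SPEC =====
def Spec_parse_day_time (day_time : String) (out : String × String) : Prop := out = parse_day_time_alt day_time
instance (day_time : String) (out : String × String) : Decidable (Spec_parse_day_time day_time out) := by unfold Spec_parse_day_time; infer_instance

-- ===== CLAIM (what is proved, stated in full; the proofs are below) =====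
def Claim_equal_parse_day_time : Prop := ∀ (day_time : String), Dom_parse_day_time day_time → Spec_parse_day_time day_time (parse_day_time day_time)

-- ===== LEMMAS AND PROOFS =====
theorem pvLoopA_false (cs : List Char) : ∀ d t, pvLoopA cs false d t = (d, t ++ cs.filter (· ≠ ' ')) := by
  induction cs with
  | nil => simp [pvLoopA]
  | cons c cs ih =>
    intro d t
    by_cases h : c = ' ' <;> simp [pvLoopA, h, ih]

theorem pvLoopA_true (cs : List Char) : ∀ d,
    pvLoopA cs true d [] =
      (d ++ cs.takeWhile (· ≠ ' '), ((cs.dropWhile (· ≠ ' ')).drop 1).filter (· ≠ ' ')) := by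
  induction cs with
  | nil => simp [pvLoopA]
  | cons c cs ih =>
    intro d
    by_cases h : c = ' '
    · simp [pvLoopA, h, pvLoopA_false]
    · simp [pvLoopA, h, ih]

-- ===== VERDICT (by name: the statement is the Claim_ definition above) =====
theorem parse_day_time_spec : Claim_equal_parse_day_time := by
  intro s _
  unfold Spec_parse_day_time parse_day_time parse_day_time_alt
  simp [pvLoopA_true]
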